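-- pv_equiv track=rewrite | github.com/dojomouse/Advent | 2018/2/2_1.py | CountCheck
-- ===== SOURCE A (Python) =====
-- def CountCheck(box_id, count):
--     occurrences = dict()
--     for char in box_id:
--         occurrences[char] = occurrences.get(char,0) + 1
--     for val in occurrences.values():
--         if val == count:
--             return True
--     return False
-- ===== SOURCE B (Python) =====
-- def CountCheck(box_id, count):
--     s = sorted(box_id)
--     while s:
--         c = s[0]
--         run = 1
--         while run < len(s) and s[run] == c:
--             run += 1
--         if run == count:
--             return True
--         s = s[run:]
--     return False
-- ===== Notes on version B (the rewrite author's own statement) =====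
-- stated objective: alternative
-- what changed: Replaces the frequency dictionary with sort-then-scan: B sorts the characters so equal characters become adjacent and checks whether any maximal run has length equal to count, with no counting table at all.
import Mathlib
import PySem

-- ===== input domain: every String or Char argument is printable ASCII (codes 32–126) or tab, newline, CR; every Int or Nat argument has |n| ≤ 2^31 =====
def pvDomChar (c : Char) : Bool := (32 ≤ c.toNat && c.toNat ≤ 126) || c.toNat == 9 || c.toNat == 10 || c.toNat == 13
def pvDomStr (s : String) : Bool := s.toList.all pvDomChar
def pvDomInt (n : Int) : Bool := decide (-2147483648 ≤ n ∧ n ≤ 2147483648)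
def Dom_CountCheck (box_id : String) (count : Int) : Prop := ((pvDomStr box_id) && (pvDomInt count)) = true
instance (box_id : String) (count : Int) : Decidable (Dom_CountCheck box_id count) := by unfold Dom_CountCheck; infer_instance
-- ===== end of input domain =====

-- B replaces the frequency dictionary with sort-then-scan: equal characters become adjacent after
-- sorting, so B checks whether any maximal run has length `count` (alternative algorithm; same return value).
-- ===== PORT A =====
-- 'for val in occurrences.values(): if val == count: return True / return False'
def CountCheckScan (vals : List Int) (count : Int) : Bool :=
  match vals with
  | [] => false
  | v :: rest => if v == count then true else CountCheckScan rest count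

def CountCheck (box_id : String) (count : Int) : Bool :=
  let occurrences := box_id.toList.foldl
    (fun d char => d.insert char (d.getD char 0 + 1)) PySem.Dict.empty
  CountCheckScan occurrences.values count

-- ===== PORT B =====
-- outer 'while s': one step per maximal run; the inner 'while run < len(s) and s[run] == c'
-- measures the leading run of c (= 1 + takeWhile length), 's = s[run:]' drops it (= dropWhile).
def CountCheckRuns (s : List Char) (count : Int) : Bool :=
  match s with
  | [] => false
  | c :: rest =>
    let run := 1 + (rest.takeWhile (fun x => x == c)).length
    if (run : Int) == count then true
    else CountCheckRuns (rest.dropWhile (fun x => x == c)) count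
termination_by s.length
decreasing_by
  simp only [List.length_cons]
  exact Nat.lt_succ_of_le (List.length_dropWhile_le _ _)

def CountCheck_alt (box_id : String) (count : Int) : Bool :=
  CountCheckRuns (PySem.List.sorted box_id.toList (fun x => x) false) count

-- ===== PRECONDITION & SPEC =====
def Spec_CountCheck (box_id : String) (count : Int) (out : Bool) : Prop := out = CountCheck_alt box_id count
instance (box_id : String) (count : Int) (out : Bool) : Decidable (Spec_CountCheck box_id count out) := by unfold Spec_CountCheck; infer_instance

-- ===== CLAIM (what is proved, stated in full; the proofs are below) =====
def Claim_equal_CountCheck : Prop := ∀ (box_id : String) (count : Int), Dom_CountCheck box_id count → Spec_CountCheck box_id count (CountCheck box_id count)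

-- ===== LEMMAS AND PROOFS =====

-- in a sorted list c :: rest, the occurrences of c in rest are exactly its leading run
theorem count_takeWhile (c : Char) (rest : List Char)
    (hp : rest.Pairwise (· ≤ ·)) (hle : ∀ x ∈ rest, c ≤ x) :
    rest.count c = (rest.takeWhile (fun x => x == c)).length := by
  induction rest with
  | nil => rfl
  | cons a t ih =>
    rcases List.pairwise_cons.1 hp with ⟨ha, hpt⟩
    by_cases h : a = c
    · subst h
      simp only [List.takeWhile_cons, beq_self_eq_true, if_true, List.length_cons,
        List.count_cons_self]
      rw [ih hpt (fun x hx => hle x (List.mem_cons_of_mem _ hx))]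
    · have hca : c < a := lt_of_le_of_ne (hle a List.mem_cons_self) (Ne.symm h)
      have hnm : c ∉ a :: t := by
        intro hm
        rcases List.mem_cons.1 hm with h1 | h1
        · exact absurd h1.symm h
        · exact absurd (ha c h1) (not_le.2 hca)
      rw [List.count_eq_zero.2 hnm]
      simp [h]

-- after dropping the leading run of c from a sorted tail, every remaining element exceeds c
theorem lt_of_mem_dropWhile (c : Char) (rest : List Char)
    (hp : rest.Pairwise (· ≤ ·)) (hle : ∀ x ∈ rest, c ≤ x) :
    ∀ x ∈ rest.dropWhile (fun y => y == c), c < x := by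
  induction rest with
  | nil => simp
  | cons a t ih =>
    rcases List.pairwise_cons.1 hp with ⟨ha, hpt⟩
    by_cases h : a = c
    · subst h
      simpa [List.dropWhile_cons] using
        ih hpt (fun x hx => hle x (List.mem_cons_of_mem _ hx))
    · have hca : c < a := lt_of_le_of_ne (hle a List.mem_cons_self) (Ne.symm h)
      simp only [List.dropWhile_cons, beq_iff_eq, h, if_false]
      intro x hx
      rcases List.mem_cons.1 hx with h1 | h1
      · exact h1 ▸ hca
      · exact lt_of_lt_of_le hca (ha x h1)

-- A's early-return value scan is List.any
theorem CountCheckScan_eq_any (vals : List Int) (count : Int) :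
    CountCheckScan vals count = vals.any (· == count) := by
  induction vals with
  | nil => rfl
  | cons v rest ih => by_cases h : v = count <;> simp [CountCheckScan, ih, h]

-- on a sorted list, the run scan succeeds iff some character occurs exactly `count` times
theorem CountCheckRuns_true_iff (s : List Char) (count : Int) (h : s.Pairwise (· ≤ ·)) :
    CountCheckRuns s count = true ↔ ∃ c ∈ s, (s.count c : Int) = count := by
  induction s using CountCheckRuns.induct count with
  | case1 => simp [CountCheckRuns]
  | case2 c rest run hrun =>
    rcases List.pairwise_cons.1 h with ⟨hc, hpt⟩
    rw [CountCheckRuns, if_pos hrun]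
    simp only [true_iff]
    refine ⟨c, List.mem_cons_self, ?_⟩
    rw [List.count_cons_self, count_takeWhile c rest hpt hc]
    have h2 : ((1 + (rest.takeWhile (fun x => x == c)).length : Nat) : Int) = count :=
      beq_iff_eq.1 hrun
    push_cast at h2 ⊢
    omega
  | case3 c rest run hrun ih =>
    rcases List.pairwise_cons.1 h with ⟨hc, hpt⟩
    have hdrop_pw : (rest.dropWhile (fun x => x == c)).Pairwise (· ≤ ·) :=
      List.Pairwise.sublist (List.dropWhile_sublist _) hpt
    have hdlt := lt_of_mem_dropWhile c rest hpt hc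
    have hcnt : rest.count c = (rest.takeWhile (fun x => x == c)).length :=
      count_takeWhile c rest hpt hc
    have hsplit : rest = rest.takeWhile (fun x => x == c) ++ rest.dropWhile (fun x => x == c) :=
      (List.takeWhile_append_dropWhile).symm
    have hnotake : ∀ x, x ∈ rest.takeWhile (fun y => y == c) → x = c := by
      intro x hx
      have hpx := List.mem_takeWhile_imp hx
      exact beq_iff_eq.1 hpx
    have hcount_drop : ∀ x, x ≠ c →
        (c :: rest).count x = (rest.dropWhile (fun y => y == c)).count x := by
      intro x hne
      rw [List.count_cons_of_ne (fun he => hne he.symm)]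
      conv_lhs => rw [hsplit]
      rw [List.count_append, List.count_eq_zero.2 ?_, Nat.zero_add]
      intro hm
      exact hne (hnotake x hm)
    rw [CountCheckRuns, if_neg hrun, ih hdrop_pw]
    constructor
    · rintro ⟨x, hx, hxc⟩
      have hxgt : c < x := hdlt x hx
      refine ⟨x, List.mem_cons_of_mem _ ((List.dropWhile_sublist _).subset hx), ?_⟩
      rw [hcount_drop x (ne_of_gt hxgt)]
      exact hxc
    · rintro ⟨x, hx, hxc⟩
      by_cases hxe : x = c
      · exfalso
        subst hxe
        rw [List.count_cons_self, hcnt] at hxc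
        have hrun2 : ¬ (((1 + (rest.takeWhile (fun y => y == x)).length : Nat) : Int) = count) := by
          simpa using hrun
        push_cast at hxc hrun2
        omega
      · have hxr : x ∈ rest := by
          rcases List.mem_cons.1 hx with h1 | h1
          · exact absurd h1 hxe
          · exact h1
        have hxd : x ∈ rest.dropWhile (fun y => y == c) := by
          rcases (List.mem_append.1 (hsplit ▸ hxr)) with h1 | h1
          · exact absurd (hnotake x h1) hxe
          · exact h1
        refine ⟨x, hxd, ?_⟩
        rw [← hcount_drop x hxe]
        exact hxc

-- ===== VERDICT (by name: the statement is the Claim_ definition above) =====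
theorem CountCheck_spec : Claim_equal_CountCheck := by
  intro box_id count _
  unfold Spec_CountCheck
  have hA : CountCheck box_id count
      = (PySem.Set.ofList box_id.toList).any (fun k => ((box_id.toList.count k : Int) == count)) := by
    unfold CountCheck
    simp only [CountCheckScan_eq_any, PySem.Dict.foldl_insert_getD_add_one_eq_counter,
      PySem.Dict.values, PySem.Dict.items_counter, List.map_map, List.any_map]
    rfl
  unfold CountCheck_alt
  rw [hA, Bool.eq_iff_iff]
  have hperm : (PySem.List.sorted box_id.toList (fun x => x) false).Perm box_id.toList :=
    PySem.List.sorted_perm _ _ _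
  have hpw : (PySem.List.sorted box_id.toList (fun x => x) false).Pairwise (· ≤ ·) :=
    PySem.List.sorted_pairwise _ _
  rw [CountCheckRuns_true_iff _ count hpw]
  simp only [List.any_eq_true, PySem.Set.mem_ofList, beq_iff_eq]
  constructor
  · rintro ⟨x, hx, hxc⟩
    exact ⟨x, hperm.mem_iff.2 hx, by rw [hperm.count_eq]; exact hxc⟩
  · rintro ⟨x, hx, hxc⟩
    exact ⟨x, hperm.mem_iff.1 hx, by rw [← hperm.count_eq]; exact hxc⟩
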